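-- pv_equiv track=rewrite | github.com/JaviMancilla/CUBIECC | aritmeticaCuerposBinarios.py | inversor
-- ===== SOURCE A (Python) =====
-- def inversor(n, c):
--
--         a, b = n, c
--         u, v = 1, 0
--
--         if a > b:
--             a,b = b,a
--
--         while a != 1:
--             j = len(bin(a))-len(bin(b))
--             if j < 0:
--                 a, b, u, v, j = b, a, v, u, -j
--
--             a = a ^ (b << j)
--             u = u ^ (v << j)
--
--         return u
-- ===== SOURCE B (Python) =====
-- def clmul(p, u):
--     # carry-less (GF(2)) product of p and u
--     if p == 0:
--         return 0
--     return (u if p & 1 else 0) ^ clmul(p >> 1, u << 1)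
--
--
-- def inversor(n, c):
--     a, b = n, c
--     if a > b:
--         a, b = b, a
--
--     # pass 1: quotient sequence of the GF(2)-polynomial Euclidean algorithm
--     qs = []
--     while a != 1:
--         q = 0
--         while a != 1 and len(bin(a)) >= len(bin(b)):
--             j = len(bin(a)) - len(bin(b))
--             q ^= 1 << j
--             a ^= b << j
--         qs.append(q)
--         if a != 1:
--             a, b = b, a
--
--     # pass 2: back-substitution, right to left, rebuilding the Bezout coefficient
--     if not qs:
--         return 1
--     u, v = 1, qs[-1]
--     for q in reversed(qs[:-1]):
--         u, v = v, u ^ clmul(q, v)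
--     return u
-- ===== Notes on version B (the rewrite author's own statement) =====
-- stated objective: alternative
-- what changed: A threads the Bezout pair u,v online through every XOR/shift step of the extended Euclidean loop; B never tracks u,v during elimination: a first pass records only the quotient sequence of the GF(2)-polynomial Euclidean algorithm, and a second pass reconstructs the Bezout coefficient back-to-front from that sequence by the continuant recurrence, using a carry-less multiplication helper.
import Mathlib
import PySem

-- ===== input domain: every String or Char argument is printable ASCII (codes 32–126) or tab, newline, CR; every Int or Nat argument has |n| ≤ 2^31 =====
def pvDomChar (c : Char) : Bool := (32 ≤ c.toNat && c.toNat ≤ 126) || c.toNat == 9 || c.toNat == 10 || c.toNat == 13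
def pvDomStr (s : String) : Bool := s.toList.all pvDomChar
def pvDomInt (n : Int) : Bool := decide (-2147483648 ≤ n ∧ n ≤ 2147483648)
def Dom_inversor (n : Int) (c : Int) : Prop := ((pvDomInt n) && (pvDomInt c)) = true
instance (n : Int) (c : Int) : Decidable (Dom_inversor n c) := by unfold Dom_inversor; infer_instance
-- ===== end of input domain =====

-- B replaces A's online extended-Euclid loop (which threads the Bezout pair u,v through
-- every XOR step) by two separate passes: a first pass computing only the quotient
-- sequence of the GF(2)-polynomial Euclidean algorithm, and a second pass rebuilding the
-- Bezout coefficient back-to-front from that sequence with a carry-less multiplication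
-- helper (alternative decomposition, same asymptotic cost).

-- len(bin(x)) as arithmetic: 2 chars "0b", plus '-' for negatives, plus the digit count
-- (bit_length, except bin(0) = "0b0" has one digit).  Exact for every Python int.
def pyBinLen (x : Int) : Int :=
  if x = 0 then 3
  else if x < 0 then 3 + (PySem.Int.bitLength x : Int)
  else 2 + (PySem.Int.bitLength x : Int)

-- loop state of A: the four Python registers a, b, u, v
structure PVSt where
  a : Int
  b : Int
  u : Int
  v : Int
deriving Repr, DecidableEq

-- ===== PORT A =====
-- A's while-loop, fuel-indexed (fuel exhaustion returns the current u; the top-level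
-- fuel below suffices on every input where the Python loop terminates).
def loopA : Nat → PVSt → Int
  | 0, s => s.u
  | f + 1, s =>
    if s.a = 1 then s.u
    else
      let j := pyBinLen s.a - pyBinLen s.b
      if j < 0 then
        -- a, b, u, v, j = b, a, v, u, -j   then   a ^= b << j ; u ^= v << j
        loopA f ⟨PySem.Int.bxor s.b (s.a <<< (-j).toNat), s.a,
                 PySem.Int.bxor s.v (s.u <<< (-j).toNat), s.u⟩
      else
        loopA f ⟨PySem.Int.bxor s.a (s.b <<< j.toNat), s.b,
                 PySem.Int.bxor s.u (s.v <<< j.toNat), s.v⟩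

def inversor (n : Int) (c : Int) : Int :=
  loopA (n.natAbs + c.natAbs + 2) (if n > c then ⟨c, n, 1, 0⟩ else ⟨n, c, 1, 0⟩)

-- ===== PORT B =====
-- Source B's clmul, recursion on p (every call site passes p ≥ 0, where p >> 1 = p / 2;
-- the recursion is therefore taken over p.toNat).
def clmulGo (p : Nat) (u : Int) : Int :=
  if _h : p = 0 then 0
  else PySem.Int.bxor (if p % 2 = 1 then u else 0) (clmulGo (p / 2) (u <<< (1:Nat)))
termination_by p
decreasing_by exact Nat.div_lt_self (Nat.pos_of_ne_zero _h) one_lt_two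

def clmul (p : Int) (u : Int) : Int := clmulGo p.toNat u

-- pass 1 inner loop: while a != 1 and len(bin(a)) >= len(bin(b)):
--   j = len(bin(a)) - len(bin(b)); q ^= 1 << j; a ^= b << j
-- fuel-indexed like loopA (one unit per reduction); returns (remaining fuel, a, q)
def innerQ : Nat → Int → Int → Int → Nat × Int × Int
  | 0, a, _, q => (0, a, q)
  | f + 1, a, b, q =>
    if a ≠ 1 ∧ pyBinLen b ≤ pyBinLen a then
      -- j = len(bin(a)) - len(bin(b)), inlined
      innerQ f (PySem.Int.bxor a (b <<< (pyBinLen a - pyBinLen b).toNat)) b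
               (PySem.Int.bxor q ((1 : Int) <<< (pyBinLen a - pyBinLen b).toNat))
    else (f + 1, a, q)

theorem innerQ_fst_le (f : Nat) (a b q : Int) : (innerQ f a b q).1 ≤ f := by
  induction f generalizing a q with
  | zero => simp [innerQ]
  | succ f ih =>
    rw [innerQ]
    split
    · exact Nat.le_trans (ih _ _) (Nat.le_succ _)
    · exact Nat.le_refl _

theorem innerQ_noop (f : Nat) (a b q : Int) (h : (innerQ (f + 1) a b q).1 = f + 1) :
    innerQ (f + 1) a b q = (f + 1, a, q) ∧ (a = 1 ∨ pyBinLen a < pyBinLen b) := by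
  rw [innerQ] at h ⊢
  by_cases hc : a ≠ 1 ∧ pyBinLen b ≤ pyBinLen a
  · rw [if_pos hc] at h
    exact absurd h (Nat.ne_of_lt (Nat.lt_succ_of_le (innerQ_fst_le _ _ _ _)))
  · rw [if_neg hc]
    refine ⟨rfl, ?_⟩
    by_cases ha : a = 1
    · exact Or.inl ha
    · rcases not_and_or.mp hc with h1 | h2
      · exact absurd (not_not.mp h1) ha
      · exact Or.inr (lt_of_not_ge h2)

-- pass 1 outer loop: collect one quotient per full division step, swapping between
-- steps; fuel accounting identical to loopA's (swaps are free).
def outerQ : Nat → Int → Int → List Int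
  | 0, _, _ => []
  | f + 1, a, b =>
    if a = 1 then []
    else
      let r := innerQ (f + 1) a b 0
      if r.2.1 = 1 then [r.2.2]
      else
        match h : r.1 with
        | 0 => [r.2.2]
        | g + 1 => r.2.2 :: outerQ (g + 1) b r.2.1
termination_by f a b => (f, if pyBinLen a < pyBinLen b then 1 else 0)
decreasing_by
  rename_i _hne hne'
  rcases Nat.lt_or_ge (g + 1) (f + 1) with hlt | hge
  · exact Prod.Lex.left _ _ hlt
  · have heq : (innerQ (f + 1) a b 0).1 = f + 1 :=
      Nat.le_antisymm (innerQ_fst_le _ _ _ _) (h ▸ hge)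
    obtain ⟨hinner, hstop⟩ := innerQ_noop f a b 0 heq
    have hgf : g + 1 = f + 1 := h.symm.trans heq
    have hs2 : (innerQ (f + 1) a b 0).2.1 = a := by rw [hinner]
    rcases hstop with h1 | hlen
    · exact absurd h1 (by rw [hs2] at hne'; exact hne')
    · rw [hgf, hs2]
      have : (if pyBinLen b < pyBinLen a then 1 else 0) <
             (if pyBinLen a < pyBinLen b then 1 else 0) := by
        rw [if_pos hlen, if_neg (not_lt.mpr (le_of_lt hlen))]
        exact Nat.zero_lt_one
      exact Prod.Lex.right (f + 1) this

-- pass 2 step: u, v = v, u ^ clmul(q, v)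
def bstep (p : Int × Int) (q : Int) : Int × Int := (p.2, PySem.Int.bxor p.1 (clmul q p.2))

-- pass 2: if not qs: return 1; u, v = 1, qs[-1]; for q in reversed(qs[:-1]): bstep.
-- (qs.reverse = [] exactly when qs = [], i.e. Source B's 'if not qs' guard; the head of
-- qs.reverse is qs[-1] and its tail is reversed(qs[:-1]).)
def bwdRun (qs : List Int) : Int :=
  match qs.reverse with
  | [] => 1
  | qlast :: rest => (rest.foldl bstep (1, qlast)).1

def inversor_alt (n : Int) (c : Int) : Int :=
  if n > c then bwdRun (outerQ (n.natAbs + c.natAbs + 2) c n)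
  else bwdRun (outerQ (n.natAbs + c.natAbs + 2) n c)

-- ===== PRECONDITION & SPEC =====
-- No Pre_: the two ports agree on every input (on inputs where the Python loops
-- diverge, both fuel-indexed ports consume fuel step for step and agree as well).
def Spec_inversor (n : Int) (c : Int) (out : Int) : Prop := out = inversor_alt n c
instance (n : Int) (c : Int) (out : Int) : Decidable (Spec_inversor n c out) := by
  unfold Spec_inversor; infer_instance

-- ===== CLAIM (what is proved, stated in full; the proofs are below) =====
def Claim_equal_inversor : Prop := ∀ (n : Int) (c : Int), Dom_inversor n c → Spec_inversor n c (inversor n c)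

-- ===== LEMMAS AND PROOFS =====

-- ---------- carry-less multiplication on Nat (reference semantics) ----------
def cm (p u : Nat) : Nat :=
  if _h : p = 0 then 0
  else (if p % 2 = 1 then u else 0) ^^^ cm (p / 2) (2 * u)
termination_by p
decreasing_by exact Nat.div_lt_self (Nat.pos_of_ne_zero _h) one_lt_two

theorem cm_zero_left (u : Nat) : cm 0 u = 0 := by rw [cm]; simp

theorem cm_ne {p : Nat} (hp : p ≠ 0) (u : Nat) :
    cm p u = (if p % 2 = 1 then u else 0) ^^^ cm (p / 2) (2 * u) := by
  conv_lhs => rw [cm]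
  rw [dif_neg hp]

theorem cm_zero_right (p : Nat) : cm p 0 = 0 := by
  induction p using Nat.strong_induction_on with
  | _ p ih =>
    by_cases hp : p = 0
    · subst hp; exact cm_zero_left 0
    · rw [cm_ne hp, mul_zero, ih (p / 2) (Nat.div_lt_self (Nat.pos_of_ne_zero hp) one_lt_two)]
      simp

theorem two_mul_xor (a b : Nat) : 2 * a ^^^ 2 * b = 2 * (a ^^^ b) := by
  have h1 : (2 * a ^^^ 2 * b) % 2 = (2 * a + 2 * b) % 2 := Nat.xor_mod_two_eq
  have h2 : (2 * a ^^^ 2 * b) / 2 = (2 * a) / 2 ^^^ (2 * b) / 2 := Nat.xor_div_two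
  have ha : (2 * a) / 2 = a := by omega
  have hb : (2 * b) / 2 = b := by omega
  rw [ha, hb] at h2
  omega

theorem mod_xor_two_mul (r u : Nat) (hr : r ≤ 1) : r ^^^ 2 * (u / 2) = 2 * (u / 2) + r := by
  have h1 : (r ^^^ 2 * (u / 2)) % 2 = (r + 2 * (u / 2)) % 2 := Nat.xor_mod_two_eq
  have h2 : (r ^^^ 2 * (u / 2)) / 2 = r / 2 ^^^ (2 * (u / 2)) / 2 := Nat.xor_div_two
  have hr2 : r / 2 = 0 := by omega
  have hu2 : (2 * (u / 2)) / 2 = u / 2 := by omega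
  rw [hr2, hu2, Nat.zero_xor] at h2
  omega

theorem cm_double_right (p u : Nat) : cm p (2 * u) = 2 * cm p u := by
  induction p using Nat.strong_induction_on generalizing u with
  | _ p ih =>
    by_cases hp : p = 0
    · subst hp; rw [cm_zero_left, cm_zero_left, mul_zero]
    · rw [cm_ne hp, cm_ne hp,
        ih (p / 2) (Nat.div_lt_self (Nat.pos_of_ne_zero hp) one_lt_two), ← two_mul_xor]
      congr 1
      split <;> simp

theorem cm_double_left (p u : Nat) : cm (2 * p) u = cm p (2 * u) := by
  by_cases hp : p = 0
  · subst hp; rw [mul_zero, cm_zero_left, cm_zero_left]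
  · have h2p : (2 * p) ≠ 0 := by omega
    rw [cm_ne h2p]
    have hmod : ¬ ((2 * p) % 2 = 1) := by omega
    have hdiv : (2 * p) / 2 = p := by omega
    rw [if_neg hmod, hdiv, Nat.zero_xor]

theorem cm_one_left (u : Nat) : cm 1 u = u := by
  rw [cm_ne one_ne_zero]
  norm_num [cm_zero_left]

theorem cm_one_right (u : Nat) : cm u 1 = u := by
  induction u using Nat.strong_induction_on with
  | _ u ih =>
    by_cases hu : u = 0
    · subst hu; rw [cm_zero_left]
    · rw [cm_ne hu]
      have h2 : cm (u / 2) (2 * 1) = 2 * cm (u / 2) 1 := cm_double_right (u / 2) 1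
      norm_num at h2
      rw [h2, ih (u / 2) (Nat.div_lt_self (Nat.pos_of_ne_zero hu) one_lt_two)]
      rcases Nat.mod_two_eq_zero_or_one u with h | h
      · rw [if_neg (by omega), mod_xor_two_mul 0 u (by omega)]
        omega
      · rw [if_pos h, mod_xor_two_mul 1 u (by omega)]
        omega

theorem cm_xor_right (p u v : Nat) : cm p (u ^^^ v) = cm p u ^^^ cm p v := by
  induction p using Nat.strong_induction_on generalizing u v with
  | _ p ih =>
    by_cases hp : p = 0
    · subst hp; simp [cm_zero_left]
    · rw [cm_ne hp, cm_ne hp, cm_ne hp, ← two_mul_xor,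
        ih (p / 2) (Nat.div_lt_self (Nat.pos_of_ne_zero hp) one_lt_two)]
      split
      · simp only [Nat.xor_assoc]
        congr 1
        simp [Nat.xor_left_comm]
      · simp

theorem cm_xor_left (p q u : Nat) : cm (p ^^^ q) u = cm p u ^^^ cm q u := by
  induction p using Nat.strong_induction_on generalizing q u with
  | _ p ih =>
    by_cases hp : p = 0
    · subst hp; rw [cm_zero_left, Nat.zero_xor, Nat.zero_xor]
    by_cases hq : q = 0
    · subst hq; rw [cm_zero_left, Nat.xor_zero, Nat.xor_zero]
    by_cases hpq : p ^^^ q = 0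
    · rw [hpq, cm_zero_left, Nat.xor_eq_zero_iff.mp hpq, Nat.xor_self]
    · rw [cm_ne hpq, Nat.xor_div_two,
        ih (p / 2) (Nat.div_lt_self (Nat.pos_of_ne_zero hp) one_lt_two),
        cm_ne hp, cm_ne hq]
      have hm : (p ^^^ q) % 2 = (p + q) % 2 := Nat.xor_mod_two_eq
      rcases Nat.mod_two_eq_zero_or_one p with h1 | h1 <;>
        rcases Nat.mod_two_eq_zero_or_one q with h2 | h2
      · rw [if_neg (by omega), if_neg (by omega), if_neg (by omega)]
        simp
      · rw [if_pos (by omega), if_neg (by omega), if_pos (by omega)]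
        simp [Nat.xor_left_comm]
      · rw [if_pos (by omega), if_pos (by omega), if_neg (by omega)]
        simp [Nat.xor_left_comm, Nat.xor_comm]
      · rw [if_neg (by omega), if_pos (by omega), if_pos (by omega)]
        simp [Nat.xor_assoc, Nat.xor_left_comm, Nat.xor_xor_cancel_left]

theorem cm_cm_left (q y c : Nat) : cm (cm q y) c = cm y (cm q c) := by
  induction q using Nat.strong_induction_on generalizing y c with
  | _ q ih =>
    by_cases hq : q = 0
    · subst hq; simp [cm_zero_left, cm_zero_right]
    · rw [cm_ne hq y, cm_ne hq c, cm_xor_left, cm_xor_right, cm_double_right,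
        cm_double_left,
        ih (q / 2) (Nat.div_lt_self (Nat.pos_of_ne_zero hq) one_lt_two)]
      congr 1
      rcases Nat.mod_two_eq_zero_or_one q with h | h
      · rw [if_neg (by omega), if_neg (by omega), cm_zero_left, cm_zero_right]
      · rw [if_pos h, if_pos h]

theorem cm_comm (a b : Nat) : cm a b = cm b a := by
  have h := cm_cm_left a b 1
  rwa [cm_one_right, cm_one_right] at h

theorem cm_pow (j u : Nat) : cm (2 ^ j) u = 2 ^ j * u := by
  induction j generalizing u with
  | zero => simpa using cm_one_left u
  | succ j ih =>
    rw [pow_succ, mul_comm (2 ^ j) 2, cm_double_left, ih]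
    ring

-- ---------- Int / Nat bridges ----------
theorem shift_natCast (m k : Nat) : ((m : Int) <<< k) = ((m <<< k : Nat) : Int) := by
  rw [Int.shiftLeft_eq, Nat.shiftLeft_eq]
  push_cast
  ring

theorem clmulGo_cast (p u : Nat) : clmulGo p ↑u = ↑(cm p u) := by
  induction p using Nat.strong_induction_on generalizing u with
  | _ p ih =>
    rw [clmulGo, cm]
    split
    · simp
    · rename_i hp
      have h1 : ((u : Int) <<< (1:Nat)) = ((2 * u : Nat) : Int) := by
        rw [Int.shiftLeft_eq]
        push_cast
        ring
      rw [h1, ih (p / 2) (Nat.div_lt_self (Nat.pos_of_ne_zero hp) one_lt_two)]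
      have h2 : (if p % 2 = 1 then (u : Int) else 0) = ((if p % 2 = 1 then u else 0 : Nat) : Int) := by
        split <;> simp
      rw [h2, PySem.Int.bxor_natCast]

theorem clmul_cast (p u : Nat) : clmul ↑p ↑u = ↑(cm p u) := by
  unfold clmul
  rw [Int.toNat_natCast]
  exact clmulGo_cast p u

-- ---------- forward replay and backward continuants (proof-side) ----------
-- G replays A's u,v updates round by round over a quotient list (last round unswapped)
def G : List Int → Int → Int → Int
  | [], u, _ => u
  | [q], u, v => PySem.Int.bxor u (clmul q v)
  | q :: q' :: t, u, v => G (q' :: t) v (PySem.Int.bxor u (clmul q v))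

-- HH computes the same linear form back-to-front (what pass 2 of B computes)
def HH : List Int → Int × Int
  | [] => (1, 0)
  | [q] => (1, q)
  | q :: q' :: t => ((HH (q' :: t)).2, PySem.Int.bxor (HH (q' :: t)).1 (clmul q (HH (q' :: t)).2))

-- B's pass 2 computes (HH qs).1
theorem bwd_pair (qs : List Int) (h : qs ≠ []) :
    (match qs.reverse with
     | [] => ((1 : Int), (0 : Int))
     | qlast :: rest => rest.foldl bstep (1, qlast)) = HH qs := by
  induction qs with
  | nil => exact absurd rfl h
  | cons q t ih =>
    cases t with
    | nil => simp [HH]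
    | cons q' s =>
      have ht : (q' :: s : List Int) ≠ [] := by simp
      have hrev : (q' :: s : List Int).reverse ≠ [] := by simp
      cases hr : (q' :: s : List Int).reverse with
      | nil => exact absurd hr hrev
      | cons l r =>
        have hqrev : (q :: q' :: s : List Int).reverse = l :: (r ++ [q]) := by
          rw [List.reverse_cons, hr]; rfl
        rw [hqrev]
        simp only [List.foldl_append, List.foldl_cons, List.foldl_nil]
        have := ih ht
        rw [hr] at this
        simp only at this
        rw [this]
        rfl

theorem bwdRun_eq_HH (qs : List Int) : bwdRun qs = (HH qs).1 := by
  cases hqs : qs with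
  | nil => rfl
  | cons q t =>
    have h := bwd_pair (q :: t) (by simp)
    unfold bwdRun
    cases hr : (q :: t : List Int).reverse with
    | nil => simp at hr
    | cons l r =>
      rw [hr] at h
      simp only at h
      show (List.foldl bstep (1, l) r).1 = (HH (q :: t)).1
      rw [h]

-- ---------- simulation: loopA = quotient list + forward replay ----------
theorem three_le_pyBinLen (x : Int) : 3 ≤ pyBinLen x := by
  unfold pyBinLen
  split
  · exact le_refl _
  · rename_i hx
    split
    · omega
    · rename_i hneg
      have hbl : 1 ≤ PySem.Int.bitLength x := by
        by_contra hlt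
        have h0 : PySem.Int.bitLength x = 0 := by omega
        have := PySem.Int.lt_two_pow_bitLength x
        rw [h0] at this
        simp at this
        exact hx (by omega)
      omega

theorem ne_one_of_len_lt {a b : Int} (h : pyBinLen a < pyBinLen b) : b ≠ 1 := by
  intro hb
  subst hb
  have h1 : pyBinLen (1 : Int) = 3 := by decide
  have := three_le_pyBinLen a
  omega

theorem loopA_of_one (f : Nat) (s : PVSt) (h : s.a = 1) : loopA f s = s.u := by
  cases f with
  | zero => rfl
  | succ f => rw [loopA, if_pos h]

theorem loopA_swap (f : Nat) (s : PVSt) (h1 : s.a ≠ 1)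
    (h2 : pyBinLen s.a < pyBinLen s.b) :
    loopA (f + 1) s = loopA (f + 1) ⟨s.b, s.a, s.v, s.u⟩ := by
  have hb1 : s.b ≠ 1 := ne_one_of_len_lt h2
  conv_lhs => rw [loopA]
  conv_rhs => rw [loopA]
  rw [if_neg h1, if_neg hb1]
  have hj : pyBinLen s.a - pyBinLen s.b < 0 := by omega
  rw [if_pos hj]
  have hj' : ¬ pyBinLen s.b - pyBinLen s.a < 0 := by omega
  rw [if_neg hj']
  have hneg : -(pyBinLen s.a - pyBinLen s.b) = pyBinLen s.b - pyBinLen s.a := by ring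
  rw [hneg]

theorem innerQ_stop (f : Nat) (a b q : Int) (h : (innerQ f a b q).1 ≠ 0) :
    (innerQ f a b q).2.1 = 1 ∨ pyBinLen (innerQ f a b q).2.1 < pyBinLen b := by
  induction f generalizing a q with
  | zero => simp [innerQ] at h
  | succ f ih =>
    rw [innerQ] at h ⊢
    by_cases hc : a ≠ 1 ∧ pyBinLen b ≤ pyBinLen a
    · rw [if_pos hc] at h
      rw [if_pos hc]
      exact ih _ _ h
    · rw [if_neg hc]
      by_cases ha : a = 1
      · exact Or.inl ha
      · rcases not_and_or.mp hc with h1 | h2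
        · exact absurd (not_not.mp h1) ha
        · exact Or.inr (lt_of_not_ge h2)

theorem shl_nonneg {x : Int} (hx : 0 ≤ x) (k : Nat) : 0 ≤ x <<< k := by
  rw [Int.shiftLeft_eq]
  positivity

theorem bxor_nonneg {x y : Int} (hx : 0 ≤ x) (hy : 0 ≤ y) : 0 ≤ PySem.Int.bxor x y := by
  rw [PySem.Int.bxor_of_nonneg hx hy]
  positivity

theorem bxor_zero_left (a : Int) : PySem.Int.bxor 0 a = a := by
  rw [PySem.Int.bxor_comm, PySem.Int.bxor_zero]

theorem bxor_assoc_nonneg {x y z : Int} (hx : 0 ≤ x) (hy : 0 ≤ y) (hz : 0 ≤ z) :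
    PySem.Int.bxor (PySem.Int.bxor x y) z = PySem.Int.bxor x (PySem.Int.bxor y z) := by
  rw [PySem.Int.bxor_of_nonneg hx hy, PySem.Int.bxor_of_nonneg hy hz,
    PySem.Int.bxor_of_nonneg (by positivity) hz,
    PySem.Int.bxor_of_nonneg hx (by positivity)]
  simp [Int.toNat_natCast, Nat.xor_assoc]

theorem innerQ_q_nonneg (f : Nat) (a b q : Int) (hq : 0 ≤ q) :
    0 ≤ (innerQ f a b q).2.2 := by
  induction f generalizing a q with
  | zero => simpa [innerQ]
  | succ f ih =>
    rw [innerQ]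
    split
    · exact ih _ _ (bxor_nonneg hq (shl_nonneg (by norm_num) _))
    · simpa

theorem innerQ_delta (f : Nat) (a b : Int) : ∀ q : Int, 0 ≤ q →
    innerQ f a b q =
      ((innerQ f a b 0).1, (innerQ f a b 0).2.1,
        PySem.Int.bxor q (innerQ f a b 0).2.2) := by
  induction f generalizing a with
  | zero => intro q hq; simp [innerQ, PySem.Int.bxor_zero]
  | succ f ih =>
    intro q hq
    rw [innerQ]
    conv_rhs => rw [innerQ]
    split
    · rename_i hc
      have hm : (0 : Int) ≤ (1 : Int) <<< (pyBinLen a - pyBinLen b).toNat :=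
        shl_nonneg (by norm_num) _
      rw [bxor_zero_left]
      set m : Int := (1 : Int) <<< (pyBinLen a - pyBinLen b).toNat with hmdef
      set a' : Int := PySem.Int.bxor a (b <<< (pyBinLen a - pyBinLen b).toNat) with ha'
      rw [ih a' (PySem.Int.bxor q m) (bxor_nonneg hq hm), ih a' m hm]
      have hznn : 0 ≤ (innerQ f a' b 0).2.2 := innerQ_q_nonneg _ _ _ _ le_rfl
      refine Prod.ext rfl (Prod.ext rfl ?_)
      simp only
      exact bxor_assoc_nonneg hq hm hznn
    · simp [PySem.Int.bxor_zero]

-- one full division round of loopA, expressed with the recorded quotient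
theorem loopA_innerQ (f : Nat) (b : Int) (vn : Nat) : ∀ (a : Int) (un : Nat),
    loopA f ⟨a, b, ↑un, ↑vn⟩ =
      loopA (innerQ f a b 0).1
        ⟨(innerQ f a b 0).2.1, b,
          ↑(un ^^^ cm (innerQ f a b 0).2.2.toNat vn), ↑vn⟩ := by
  induction f with
  | zero => intro a un; simp [innerQ, loopA, cm_zero_left]
  | succ f ih =>
    intro a un
    rw [innerQ]
    by_cases hc : a ≠ 1 ∧ pyBinLen b ≤ pyBinLen a
    · rw [if_pos hc]
      conv_lhs => rw [loopA]
      rw [if_neg hc.1]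
      have hj : ¬ pyBinLen a - pyBinLen b < 0 := by omega
      rw [if_neg hj]
      simp only
      set j : Nat := (pyBinLen a - pyBinLen b).toNat with hjdef
      set a' : Int := PySem.Int.bxor a (b <<< j) with ha'
      have hu' : PySem.Int.bxor ↑un ((vn : Int) <<< j) = ((un ^^^ (vn <<< j) : Nat) : Int) := by
        rw [shift_natCast, PySem.Int.bxor_natCast]
      rw [hu', ih a' (un ^^^ (vn <<< j))]
      have hm : (0 : Int) ≤ (1 : Int) <<< j := shl_nonneg (by norm_num) _
      rw [bxor_zero_left, innerQ_delta f a' b ((1 : Int) <<< j) hm]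
      congr 2
      -- the u components coincide
      set z := (innerQ f a' b 0).2.2 with hzdef
      have hznn : 0 ≤ z := innerQ_q_nonneg _ _ _ _ le_rfl
      have hzc : z = ((z.toNat : Nat) : Int) := (Int.toNat_of_nonneg hznn).symm
      have hmt : ((1 : Int) <<< j) = (((2 ^ j : Nat)) : Int) := by
        rw [Int.shiftLeft_eq]; push_cast; ring
      rw [hmt, hzc, PySem.Int.bxor_natCast, Int.toNat_natCast, Int.toNat_natCast,
        cm_xor_left, cm_pow]
      have hshift : (vn <<< j : Nat) = 2 ^ j * vn := by rw [Nat.shiftLeft_eq]; ring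
      rw [hshift, Nat.xor_assoc]
    · rw [if_neg hc]
      simp [cm_zero_left]

theorem outerQ_ne_nil (g : Nat) (a b : Int) (ha : a ≠ 1) : outerQ (g + 1) a b ≠ [] := by
  by_cases hc : (innerQ (g + 1) a b 0).2.1 = 1
  · rw [outerQ, if_neg ha, if_pos hc]
    simp
  · rw [outerQ, if_neg ha, if_neg hc]
    split <;> simp

-- entries of the quotient list are nonnegative
theorem outerQ_nonneg (f : Nat) (a b : Int) : ∀ q ∈ outerQ f a b, 0 ≤ q := by
  induction f, a, b using outerQ.induct with
  | case1 a b => simp [outerQ]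
  | case2 f b => simp [outerQ]
  | case3 f a b h1 r h2 =>
    have hr : r = innerQ (f + 1) a b 0 := rfl
    rw [hr] at h2
    rw [outerQ, if_neg h1, if_pos h2]
    intro q hq
    rw [List.mem_singleton] at hq
    subst hq
    exact innerQ_q_nonneg _ _ _ _ le_rfl
  | case4 f a b h1 r h2 h0 =>
    have hr : r = innerQ (f + 1) a b 0 := rfl
    rw [hr] at h2 h0
    rw [outerQ, if_neg h1, if_neg h2]
    split
    · intro q hq
      rw [List.mem_singleton] at hq
      subst hq
      exact innerQ_q_nonneg _ _ _ _ le_rfl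
    · rename_i g hgg
      rw [h0] at hgg
      exact absurd hgg.symm (Nat.succ_ne_zero g)
  | case5 f a b h1 r h2 g hg ih =>
    have hr : r = innerQ (f + 1) a b 0 := rfl
    rw [hr] at h2 hg
    rw [outerQ, if_neg h1, if_neg h2]
    split
    · rename_i h0x
      rw [hg] at h0x
      exact absurd h0x (Nat.succ_ne_zero g)
    · rename_i g' hgg
      rw [hg] at hgg
      have hg' : g' = g := by omega
      subst hg'
      intro q hq
      rcases List.mem_cons.mp hq with h | h
      · subst h
        exact innerQ_q_nonneg _ _ _ _ le_rfl
      · exact ih q h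

-- main simulation: A's loop value = quotient list + forward replay
theorem loopA_eq_G (f : Nat) (a b : Int) : ∀ (un vn : Nat),
    loopA f ⟨a, b, ↑un, ↑vn⟩ = G (outerQ f a b) ↑un ↑vn := by
  induction f, a, b using outerQ.induct with
  | case1 a b => intro un vn; simp [outerQ, loopA, G]
  | case2 f b =>
    intro un vn
    rw [outerQ, if_pos rfl, loopA_of_one _ _ rfl]
    rfl
  | case3 f a b h1 r h2 =>
    intro un vn
    have hr : r = innerQ (f + 1) a b 0 := rfl
    rw [hr] at h2
    rw [outerQ, if_neg h1, if_pos h2, loopA_innerQ (f + 1) b vn a un,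
      loopA_of_one _ _ h2]
    have hznn : 0 ≤ (innerQ (f + 1) a b 0).2.2 := innerQ_q_nonneg _ _ _ _ le_rfl
    show (↑(un ^^^ cm (innerQ (f + 1) a b 0).2.2.toNat vn) : Int)
        = PySem.Int.bxor ↑un (clmul (innerQ (f + 1) a b 0).2.2 ↑vn)
    rw [show clmul (innerQ (f + 1) a b 0).2.2 (↑vn : Int)
          = clmul ↑(innerQ (f + 1) a b 0).2.2.toNat ↑vn by
        rw [Int.toNat_of_nonneg hznn]]
    rw [clmul_cast, PySem.Int.bxor_natCast]
  | case4 f a b h1 r h2 h0 =>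
    intro un vn
    have hr : r = innerQ (f + 1) a b 0 := rfl
    rw [hr] at h2 h0
    rw [outerQ, if_neg h1, if_neg h2, loopA_innerQ (f + 1) b vn a un, h0]
    have hznn : 0 ≤ (innerQ (f + 1) a b 0).2.2 := innerQ_q_nonneg _ _ _ _ le_rfl
    split
    · show (↑(un ^^^ cm (innerQ (f + 1) a b 0).2.2.toNat vn) : Int)
          = PySem.Int.bxor ↑un (clmul (innerQ (f + 1) a b 0).2.2 ↑vn)
      rw [show clmul (innerQ (f + 1) a b 0).2.2 (↑vn : Int)
            = clmul ↑(innerQ (f + 1) a b 0).2.2.toNat ↑vn by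
          rw [Int.toNat_of_nonneg hznn]]
      rw [clmul_cast, PySem.Int.bxor_natCast]
    · rename_i g hgg
      exact absurd hgg.symm (Nat.succ_ne_zero g)
  | case5 f a b h1 r h2 g hg ih =>
    intro un vn
    have hr : r = innerQ (f + 1) a b 0 := rfl
    rw [hr] at h2 hg
    have hstop := innerQ_stop (f + 1) a b 0 (by rw [hg]; exact Nat.succ_ne_zero g)
    have hlen : pyBinLen (innerQ (f + 1) a b 0).2.1 < pyBinLen b := by
      rcases hstop with hone | hlt
      · exact absurd hone h2
      · exact hlt
    have hbne : b ≠ 1 := ne_one_of_len_lt hlen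
    rw [outerQ, if_neg h1, if_neg h2, loopA_innerQ (f + 1) b vn a un, hg,
      loopA_swap g _ h2 hlen, ih vn (un ^^^ cm (innerQ (f + 1) a b 0).2.2.toNat vn)]
    split
    · rename_i h0x
      exact absurd h0x (Nat.succ_ne_zero g)
    · rename_i g' hgg
      have hg' : g' = g := by omega
      rw [hg']
      -- G over a cons with nonempty tail
      have hne := outerQ_ne_nil g b (innerQ (f + 1) a b 0).2.1 hbne
      have hznn : 0 ≤ (innerQ (f + 1) a b 0).2.2 := innerQ_q_nonneg _ _ _ _ le_rfl
      cases hrest : outerQ (g + 1) b (innerQ (f + 1) a b 0).2.1 with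
      | nil => exact absurd hrest hne
      | cons q' t =>
        show G (q' :: t) ↑vn (↑(un ^^^ cm (innerQ (f + 1) a b 0).2.2.toNat vn) : Int)
            = G (q' :: t) ↑vn (PySem.Int.bxor ↑un (clmul (innerQ (f + 1) a b 0).2.2 ↑vn))
        congr 1
        rw [show clmul (innerQ (f + 1) a b 0).2.2 (↑vn : Int)
              = clmul ↑(innerQ (f + 1) a b 0).2.2.toNat ↑vn by
            rw [Int.toNat_of_nonneg hznn]]
        rw [clmul_cast, PySem.Int.bxor_natCast]

-- ---------- palindrome: forward replay = backward continuants ----------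
theorem G_eq_HH (qs : List Int) (hq : ∀ q ∈ qs, 0 ≤ q) :
    ∃ X Y : Nat, HH qs = (↑X, ↑Y) ∧
      ∀ un vn : Nat, G qs ↑un ↑vn = ↑(cm un X ^^^ cm vn Y) := by
  induction qs using HH.induct with
  | case1 =>
    refine ⟨1, 0, by norm_num [HH], fun un vn => ?_⟩
    show (↑un : Int) = _
    rw [cm_one_right, cm_zero_right, Nat.xor_zero]
  | case2 q =>
    have hq0 : 0 ≤ q := hq q (by simp)
    refine ⟨1, q.toNat, ?_, fun un vn => ?_⟩
    · show ((1 : Int), q) = _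
      rw [Int.toNat_of_nonneg hq0]
      norm_num
    · show PySem.Int.bxor ↑un (clmul q ↑vn) = _
      rw [show clmul q (↑vn : Int) = clmul ↑q.toNat ↑vn by rw [Int.toNat_of_nonneg hq0],
        clmul_cast, PySem.Int.bxor_natCast, cm_one_right, cm_comm q.toNat vn]
  | case3 q q' t ih =>
    obtain ⟨X, Y, hHH, hG⟩ := ih (fun x hx => hq x (List.mem_cons_of_mem q hx))
    have hq0 : 0 ≤ q := hq q (by simp)
    refine ⟨Y, X ^^^ cm q.toNat Y, ?_, fun un vn => ?_⟩
    · show ((HH (q' :: t)).2, PySem.Int.bxor (HH (q' :: t)).1 (clmul q (HH (q' :: t)).2)) = _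
      rw [hHH]
      simp only
      rw [show clmul q ((Y : Nat) : Int) = clmul ↑q.toNat ↑Y by rw [Int.toNat_of_nonneg hq0],
        clmul_cast, PySem.Int.bxor_natCast]
    · show G (q' :: t) ↑vn (PySem.Int.bxor ↑un (clmul q ↑vn)) = _
      rw [show clmul q ((vn : Nat) : Int) = clmul ↑q.toNat ↑vn by rw [Int.toNat_of_nonneg hq0],
        clmul_cast, PySem.Int.bxor_natCast, hG vn (un ^^^ cm q.toNat vn)]
      congr 1
      rw [cm_xor_left, cm_cm_left, cm_xor_right]
      simp [Nat.xor_left_comm]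

theorem inversor_eq_on (F : Nat) (a b : Int) :
    loopA F ⟨a, b, 1, 0⟩ = bwdRun (outerQ F a b) := by
  obtain ⟨X, Y, hHH, hG⟩ := G_eq_HH (outerQ F a b) (outerQ_nonneg F a b)
  have h1 := loopA_eq_G F a b 1 0
  have h2 := hG 1 0
  simp only [Nat.cast_one, Nat.cast_zero] at h1 h2
  rw [bwdRun_eq_HH, hHH, h1, h2, cm_one_left, cm_zero_left, Nat.xor_zero]

-- ===== VERDICT (by name: the statement is the Claim_ definition above) =====
theorem inversor_spec : Claim_equal_inversor := by
  intro n c _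
  unfold Spec_inversor inversor inversor_alt
  split <;> exact inversor_eq_on _ _ _
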